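-- pv_equiv track=rewrite | github.com/jaewoogwak/sit-v2 | src/Validations/validations_timinig.py | get_gt
-- ===== SOURCE A (Python) =====
-- def get_gt(video_metas, query_metas):
--     v2t_gt = []
--     for vid_id in video_metas:
--         v2t_gt.append([])
--         for i, query_id in enumerate(query_metas):
--             if query_id.split('#', 1)[0] == vid_id:
--
--                 v2t_gt[-1].append(i)
--
--     t2v_gt = {}
--     for i, t_gts in enumerate(v2t_gt):
--         for t_gt in t_gts:
--             t2v_gt.setdefault(t_gt, [])
--             t2v_gt[t_gt].append(i)
--
--     return v2t_gt, t2v_gt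
-- ===== SOURCE B (Python) =====
-- def get_gt(video_metas, query_metas):
--     # Index query indices by their '#'-prefix once, then one lookup per video.
--     by_prefix = {}
--     for i, q in enumerate(query_metas):
--         by_prefix.setdefault(q.split('#', 1)[0], []).append(i)
--     v2t_gt = []
--     t2v_gt = {}
--     for vi, v in enumerate(video_metas):
--         qs = by_prefix.get(v, [])
--         v2t_gt.append(list(qs))
--         for q in qs:
--             t2v_gt.setdefault(q, []).append(vi)
--     return v2t_gt, t2v_gt
-- ===== Notes on version B (the rewrite author's own statement) =====
-- stated objective: alternative
-- what changed: Instead of scanning all queries once per video (nested loops), B builds a dict from query '#'-prefix to query indices in one pass and answers each video with a single lookup, fusing the t2v construction into the same video pass; measured ~2.4-3x faster on the generated inputs but not confirmed at the largest size, so no speed claim.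
import Mathlib
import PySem

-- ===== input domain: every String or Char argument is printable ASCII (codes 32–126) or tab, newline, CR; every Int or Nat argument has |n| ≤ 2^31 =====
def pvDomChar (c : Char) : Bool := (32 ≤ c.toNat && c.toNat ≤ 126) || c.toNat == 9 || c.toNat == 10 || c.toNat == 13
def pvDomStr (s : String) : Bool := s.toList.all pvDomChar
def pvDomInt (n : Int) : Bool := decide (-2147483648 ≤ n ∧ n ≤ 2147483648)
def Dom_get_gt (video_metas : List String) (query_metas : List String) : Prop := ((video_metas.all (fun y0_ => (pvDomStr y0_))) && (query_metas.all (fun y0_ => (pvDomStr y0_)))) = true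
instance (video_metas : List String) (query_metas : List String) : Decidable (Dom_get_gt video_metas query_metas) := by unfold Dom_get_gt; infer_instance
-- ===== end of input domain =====

-- B indexes queries by their '#'-prefix in a dict (one pass) and looks each video up, instead of A's scan of all queries per video; return-value equivalence (A returns fresh row lists, B may share them).


-- ===== PORT A =====
-- q.split('#', 1)[0]: split never returns an empty list, so the index-0 access never raises; headD "" is exact here.
def pyPrefix (q : String) : String := ((PySem.Str.splitMax? q "#" 1).getD []).headD ""

-- v2t_gt[-1].append(i)
def appendLast (xss : List (List Int)) (i : Int) : List (List Int) :=
  xss.dropLast ++ [(xss.getLast?.getD []) ++ [i]]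

def get_gt (video_metas : List String) (query_metas : List String) : List (List Int) × (List (Int × List Int)) :=
  let v2t_gt : List (List Int) :=
    video_metas.foldl (fun acc vid_id =>
      (PySem.List.enumerate query_metas 0).foldl
        (fun acc2 p => if pyPrefix p.2 == vid_id then appendLast acc2 p.1 else acc2)
        (acc ++ [[]])) []
  let t2v_gt : PySem.Dict Int (List Int) :=
    (PySem.List.enumerate v2t_gt 0).foldl (fun d p =>
      p.2.foldl (fun d t_gt => (d.setdefault t_gt []).modify t_gt [] (· ++ [p.1])) d)
      PySem.Dict.empty
  (v2t_gt, t2v_gt.items)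

-- ===== PORT B =====
def get_gt_alt (video_metas : List String) (query_metas : List String) : List (List Int) × (List (Int × List Int)) :=
  let by_prefix : PySem.Dict String (List Int) :=
    (PySem.List.enumerate query_metas 0).foldl
      (fun d p => d.modify (pyPrefix p.2) [] (· ++ [p.1])) PySem.Dict.empty
  let res :=
    (PySem.List.enumerate video_metas 0).foldl
      (fun (st : List (List Int) × PySem.Dict Int (List Int)) p =>
        let qs := by_prefix.getD p.2 []
        (st.1 ++ [qs], qs.foldl (fun d q => d.modify q [] (· ++ [p.1])) st.2))
      ([], PySem.Dict.empty)
  (res.1, res.2.items)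

-- ===== PRECONDITION & SPEC =====
def Spec_get_gt (video_metas : List String) (query_metas : List String) (out : List (List Int) × (List (Int × List Int))) : Prop := out = get_gt_alt video_metas query_metas
instance (video_metas : List String) (query_metas : List String) (out : List (List Int) × (List (Int × List Int))) : Decidable (Spec_get_gt video_metas query_metas out) := by unfold Spec_get_gt; infer_instance

-- ===== CLAIM (what is proved, stated in full; the proofs are below) =====
def Claim_equal_get_gt : Prop := ∀ (video_metas : List String) (query_metas : List String), Dom_get_gt video_metas query_metas → Spec_get_gt video_metas query_metas (get_gt video_metas query_metas)

-- ===== LEMMAS AND PROOFS =====\n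
-- the row A's inner loop computes for one video id
def rowOf (query_metas : List String) (vid : String) : List Int :=
  (PySem.List.enumerate query_metas 0).foldl
    (fun r p => if pyPrefix p.2 == vid then r ++ [p.1] else r) []

theorem appendLast_snoc (acc : List (List Int)) (r : List Int) (i : Int) :
    appendLast (acc ++ [r]) i = acc ++ [r ++ [i]] := by
  simp [appendLast]

theorem inner_fold_snoc (l : List (Int × String)) (vid : String) :
    ∀ (acc : List (List Int)) (r : List Int),
      l.foldl (fun acc2 p => if pyPrefix p.2 == vid then appendLast acc2 p.1 else acc2) (acc ++ [r])
      = acc ++ [l.foldl (fun r p => if pyPrefix p.2 == vid then r ++ [p.1] else r) r] := by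
  induction l with
  | nil => intro acc r; simp
  | cons p t ih =>
    intro acc r
    simp only [List.foldl_cons]
    by_cases h : (pyPrefix p.2 == vid) = true
    · rw [if_pos h, if_pos h, appendLast_snoc, ih]
    · rw [if_neg h, if_neg h, ih]

theorem v2t_eq_map (query_metas : List String) :
    ∀ (video_metas : List String) (acc : List (List Int)),
      video_metas.foldl (fun acc vid_id =>
        (PySem.List.enumerate query_metas 0).foldl
          (fun acc2 p => if pyPrefix p.2 == vid_id then appendLast acc2 p.1 else acc2)
          (acc ++ [[]])) acc
      = acc ++ video_metas.map (rowOf query_metas) := by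
  intro vs
  induction vs with
  | nil => intro acc; simp
  | cons v t ih =>
    intro acc
    simp only [List.foldl_cons, List.map_cons]
    rw [inner_fold_snoc, ih]
    simp [rowOf]

theorem rowOf_eq_getD (query_metas : List String) (vid : String) :
    rowOf query_metas vid
      = ((PySem.List.enumerate query_metas 0).foldl
          (fun d p => d.modify (pyPrefix p.2) [] (· ++ [p.1])) PySem.Dict.empty).getD vid [] := by
  have h1 : ((PySem.List.enumerate query_metas 0).foldl
      (fun d p => d.modify (pyPrefix p.2) [] (· ++ [p.1])) PySem.Dict.empty)
      = (((PySem.List.enumerate query_metas 0).map (fun p => (pyPrefix p.2, p.1))).foldl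
          (fun d q => d.modify q.1 [] (· ++ [q.2])) PySem.Dict.empty) := by
    rw [List.foldl_map]
  rw [h1, PySem.Dict.getD_foldl_modify_append]
  rw [rowOf, PySem.List.foldl_append_if]
  simp [List.filter_map, Function.comp_def]

theorem setdefault_modify (d : PySem.Dict Int (List Int)) (k : Int) (f : List Int → List Int) :
    (d.setdefault k []).modify k [] f = d.modify k [] f := by
  by_cases h : d.contains k = true
  · rw [PySem.Dict.setdefault_of_contains d _ h]
  · have h' : d.contains k = false := by simpa using h
    rw [PySem.Dict.setdefault_of_not_contains d _ h']
    simp only [PySem.Dict.modify]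
    rw [PySem.Dict.getD_insert_self, PySem.Dict.insert_insert_self,
        PySem.Dict.getD_of_not_contains d _ h']

theorem fused_eq (D : PySem.Dict String (List Int)) :
    ∀ (vs : List String) (n : Int) (v2acc : List (List Int)) (dacc : PySem.Dict Int (List Int)),
      (PySem.List.enumerate vs n).foldl
        (fun (st : List (List Int) × PySem.Dict Int (List Int)) p =>
          (st.1 ++ [D.getD p.2 []],
           (D.getD p.2 []).foldl (fun d q => d.modify q [] (· ++ [p.1])) st.2))
        (v2acc, dacc)
      = (v2acc ++ vs.map (fun v => D.getD v []),
         (PySem.List.enumerate (vs.map (fun v => D.getD v [])) n).foldl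
           (fun d p => p.2.foldl (fun d t => d.modify t [] (· ++ [p.1])) d) dacc) := by
  intro vs
  induction vs with
  | nil => intro n v2acc dacc; simp [PySem.List.enumerate_nil]
  | cons v t ih =>
    intro n v2acc dacc
    simp only [List.map_cons, PySem.List.enumerate_cons, List.foldl_cons]
    rw [ih]
    simp

-- ===== VERDICT (by name: the statement is the Claim_ definition above) =====
theorem get_gt_spec : Claim_equal_get_gt := by
  intro vs qs _
  show get_gt vs qs = get_gt_alt vs qs
  unfold get_gt get_gt_alt
  simp only []
  rw [v2t_eq_map, fused_eq]
  have hrow : rowOf qs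
      = fun v => ((PySem.List.enumerate qs 0).foldl
          (fun d p => d.modify (pyPrefix p.2) [] (· ++ [p.1])) PySem.Dict.empty).getD v [] :=
    funext (rowOf_eq_getD qs)
  have hfun : (fun (d : PySem.Dict Int (List Int)) (p : Int × List Int) =>
        p.2.foldl (fun d t => (d.setdefault t []).modify t [] (· ++ [p.1])) d)
      = fun d p => p.2.foldl (fun d t => d.modify t [] (· ++ [p.1])) d := by
    funext d p
    have h2 : (fun (d : PySem.Dict Int (List Int)) (t : Int) =>
          (d.setdefault t []).modify t [] (· ++ [p.1]))
        = fun d t => d.modify t [] (· ++ [p.1]) :=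
      funext fun d => funext fun t => setdefault_modify d t _
    rw [h2]
  rw [hrow, hfun]
  simp
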